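-- pv_equiv track=rewrite | github.com/mobynickkk/dz | StepService.py | is_winning_situation
-- ===== SOURCE A (Python) =====
-- def is_winning_situation(steps) -> bool:
--     if len(steps) < 3:
--         return False
--
--     first = steps[0]
--     second = steps[1]
--
--     for i in range(2, len(steps)):
--         if abs(first - second) == 1 and abs(second - steps[i]) == 1:
--             return True
--
--         first = second
--         second = steps[i]
--
--     return False
-- ===== SOURCE B (Python) =====
-- def is_winning_situation(steps) -> bool:
--     # Partition the steps into maximal chains in which every adjacent pair
--     # differs by exactly 1; the situation is winning iff some chain holds
--     # at least 3 steps.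
--     chains = []
--     cur = steps[:1]
--     for x in steps[1:]:
--         if cur and abs(x - cur[-1]) == 1:
--             cur.append(x)
--         else:
--             chains.append(cur)
--             cur = [x]
--     chains.append(cur)
--     return any(len(c) >= 3 for c in chains)
-- ===== Notes on version B (the rewrite author's own statement) =====
-- stated objective: alternative
-- what changed: B partitions the list into maximal chains of adjacent elements differing by 1 (a grouping/run-length decomposition) and answers whether any chain has length >= 3, instead of A's sliding two-element window with early return.
import Mathlib
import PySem

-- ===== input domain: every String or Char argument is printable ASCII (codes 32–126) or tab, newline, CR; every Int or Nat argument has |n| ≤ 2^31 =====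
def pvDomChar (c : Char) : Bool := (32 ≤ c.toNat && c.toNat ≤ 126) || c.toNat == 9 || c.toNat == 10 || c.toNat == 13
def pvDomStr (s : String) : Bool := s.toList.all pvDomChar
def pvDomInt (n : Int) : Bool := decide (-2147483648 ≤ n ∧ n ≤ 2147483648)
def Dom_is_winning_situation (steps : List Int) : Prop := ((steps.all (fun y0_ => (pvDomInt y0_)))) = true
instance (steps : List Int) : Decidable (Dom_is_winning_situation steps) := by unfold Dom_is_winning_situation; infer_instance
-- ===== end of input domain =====

-- B partitions the steps into maximal chains of unit jumps and asks whether any chain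
-- has length >= 3, instead of A's sliding two-element window with early return. Same O(n).

-- ===== PORT A =====
-- the 'for i in range(2, len(steps))' loop carrying first/second
def pvALoop (first second : Int) (rest : List Int) : Bool :=
  match rest with
  | [] => false
  | x :: xs =>
      if |first - second| = 1 ∧ |second - x| = 1 then true
      else pvALoop second x xs

def is_winning_situation (steps : List Int) : Bool :=
  if steps.length < 3 then false
  else
    match steps with
    | a :: b :: rest => pvALoop a b rest
    | _ => false

-- ===== PORT B =====
-- loop body: extend the current chain if the next step differs from its last by 1,
-- otherwise close it and start a new chain
def pvStep (st : List (List Int) × List Int) (x : Int) : List (List Int) × List Int :=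
  match st.2.getLast? with
  | some l => if |x - l| = 1 then (st.1, st.2 ++ [x]) else (st.1 ++ [st.2], [x])
  | none => (st.1 ++ [st.2], [x])

def pvBuildChains (steps : List Int) : List (List Int) :=
  let st := steps.tail.foldl pvStep ([], steps.take 1)
  st.1 ++ [st.2]

def is_winning_situation_alt (steps : List Int) : Bool :=
  (pvBuildChains steps).any (fun c => decide (3 ≤ c.length))

-- ===== PRECONDITION & SPEC =====
def Spec_is_winning_situation (steps : List Int) (out : Bool) : Prop := out = is_winning_situation_alt steps
instance (steps : List Int) (out : Bool) : Decidable (Spec_is_winning_situation steps out) := by unfold Spec_is_winning_situation; infer_instance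

-- ===== CLAIM =====
def Claim_equal_is_winning_situation : Prop := ∀ (steps : List Int), Dom_is_winning_situation steps → Spec_is_winning_situation steps (is_winning_situation steps)

-- ===== LEMMAS AND PROOFS =====

-- "some chain so far, or the open one, has >= 3 steps"
def pvAnyP (st : List (List Int) × List Int) : Bool :=
  (st.1 ++ [st.2]).any (fun c => decide (3 ≤ c.length))

-- B's fold starting from chains = [], as a function of the open chain and the remainder
def pvG (cur rest : List Int) : Bool :=
  pvAnyP (rest.foldl pvStep ([], cur))

lemma pvG_dist (rest : List Int) : ∀ (chains : List (List Int)) (cur : List Int),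
    pvAnyP (rest.foldl pvStep (chains, cur))
    = (chains.any (fun c => decide (3 ≤ c.length)) || pvG cur rest) := by
  induction rest with
  | nil => intro chains cur; simp [pvG, pvAnyP, List.any_append]
  | cons x xs ih =>
      intro chains cur
      simp only [List.foldl_cons, pvStep, pvG, List.nil_append]
      cases h : cur.getLast? with
      | none =>
          simp only [h]
          rw [ih (chains ++ [cur]) [x], ih [cur] [x]]
          simp [List.any_append, Bool.or_assoc, pvG]
      | some l =>
          simp only [h]
          by_cases hu : |x - l| = 1
          · simp only [if_pos hu]
            rw [ih chains (cur ++ [x]), ih [] (cur ++ [x])]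
            simp [pvG]
          · simp only [if_neg hu]
            rw [ih (chains ++ [cur]) [x], ih [cur] [x]]
            simp [List.any_append, Bool.or_assoc, pvG]

lemma pvG_nil (cur : List Int) : pvG cur [] = decide (3 ≤ cur.length) := by
  simp [pvG, pvAnyP]

lemma pvG_cons (cur : List Int) (l x : Int) (xs : List Int) (h : cur.getLast? = some l) :
    pvG cur (x :: xs) =
      if |x - l| = 1 then pvG (cur ++ [x]) xs
      else (decide (3 ≤ cur.length) || pvG [x] xs) := by
  simp only [pvG, List.foldl_cons, pvStep, h, List.nil_append]
  by_cases hu : |x - l| = 1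
  · simp only [if_pos hu]
  · simp only [if_neg hu]
    rw [pvG_dist xs [cur] [x]]
    simp [pvG]

lemma pvG_long (rest : List Int) : ∀ (cur : List Int), 3 ≤ cur.length → pvG cur rest = true := by
  induction rest with
  | nil => intro cur h; simp [pvG_nil, h]
  | cons x xs ih =>
      intro cur h
      have hne : cur ≠ [] := by intro e; simp [e] at h
      obtain ⟨l, hl⟩ := Option.isSome_iff_exists.mp (List.getLast?_isSome.mpr hne)
      rw [pvG_cons cur l x xs hl]
      by_cases hu : |x - l| = 1
      · rw [if_pos hu]; exact ih _ (by simp; omega)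
      · rw [if_neg hu]; simp [h]

-- mutual characterisation: a 2-chain behaves like A's loop on a unit-linked window,
-- and a fresh 1-chain behaves like A's loop on a broken window
lemma pvG_main (rest : List Int) :
    (∀ a b : Int, |a - b| = 1 → pvG [a, b] rest = pvALoop a b rest) ∧
    (∀ b x : Int, ¬ |b - x| = 1 → pvALoop b x rest = pvG [x] rest) := by
  induction rest with
  | nil => exact ⟨fun a b _ => by simp [pvG_nil, pvALoop],
                  fun b x _ => by simp [pvG_nil, pvALoop]⟩
  | cons y ys ih =>
      constructor
      · intro a b hab
        rw [pvG_cons [a, b] b y ys (by simp)]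
        simp only [pvALoop]
        by_cases hby : |b - y| = 1
        · rw [if_pos (by rw [abs_sub_comm]; exact hby), if_pos ⟨hab, hby⟩]
          exact pvG_long ys _ (by simp)
        · rw [if_neg (by rw [abs_sub_comm]; exact hby), if_neg (by tauto)]
          have h2 : (decide (3 ≤ ([a, b] : List Int).length)) = false := by simp
          rw [h2, Bool.false_or]
          exact (ih.2 b y hby).symm
      · intro b x hbx
        rw [pvG_cons [x] x y ys (by simp)]
        simp only [pvALoop]
        rw [if_neg (by tauto)]
        by_cases hxy : |x - y| = 1
        · rw [if_pos (by rw [abs_sub_comm]; exact hxy)]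
          exact (ih.1 x y hxy).symm
        · rw [if_neg (by rw [abs_sub_comm]; exact hxy)]
          have h1 : (decide (3 ≤ ([x] : List Int).length)) = false := by simp
          rw [h1, Bool.false_or]
          exact ih.2 x y hxy

-- ===== VERDICT =====
theorem is_winning_situation_spec : Claim_equal_is_winning_situation := by
  intro steps _
  unfold Spec_is_winning_situation is_winning_situation is_winning_situation_alt
  match steps with
  | [] => decide
  | [a] => simp [pvBuildChains]
  | [a, b] =>
      simp only [List.length_cons, List.length_nil]
      rw [if_pos (by omega)]
      simp only [pvBuildChains, List.tail_cons, List.take, List.foldl_cons, List.foldl_nil, pvStep]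
      by_cases h : |b - a| = 1 <;> simp [h]
  | a :: b :: x :: rest =>
      rw [if_neg (by simp)]
      have hG : (pvBuildChains (a :: b :: x :: rest)).any (fun c => decide (3 ≤ c.length))
          = pvG [a] (b :: x :: rest) := rfl
      rw [hG, pvG_cons [a] a b (x :: rest) (by simp)]
      by_cases hab : |b - a| = 1
      · rw [if_pos hab]
        exact ((pvG_main (x :: rest)).1 a b (by rw [abs_sub_comm]; exact hab)).symm
      · rw [if_neg hab]
        have h1 : (decide (3 ≤ ([a] : List Int).length)) = false := by simp
        rw [h1, Bool.false_or]
        exact (pvG_main (x :: rest)).2 a b (by rw [abs_sub_comm]; exact hab)
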